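-- pv_equiv track=rewrite | github.com/bgim303/CodingTest | 프로그래머스/1/92334. 신고 결과 받기/신고 결과 받기.py | solution
-- ===== SOURCE A (Python) =====
-- from collections import defaultdict
--
-- def solution(id_list, report, k):
--     answer = []
--
--     report = list(set(report))
--     user = defaultdict(set)
--     cnt = defaultdict(int)
--
--     for i in report:
--         poli, coco = i.split()
--         user[poli].add(coco)
--         cnt[coco] += 1
--
--     for j in id_list:
--         result = 0
--         for t in user[j]:
--             if (cnt[t] >= k):
--                 result +=1
--         answer.append(result)
--
--     return answer
-- ===== SOURCE B (Python) =====
-- from collections import defaultdict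
--
-- def solution(id_list, report, k):
--     dedup = set(report)
--     cnt = defaultdict(int)
--     for r in dedup:
--         cnt[r.split()[1]] += 1
--     res = defaultdict(int)
--     for reporter, reported in {tuple(r.split()) for r in dedup}:
--         if cnt[reported] >= k:
--             res[reporter] += 1
--     return [res[i] for i in id_list]
-- ===== Notes on version B (the rewrite author's own statement) =====
-- stated objective: simpler
-- what changed: A builds a per-reporter set of reported users and then, for each id, rescans that set against the counts; B instead makes one flat pass over the deduplicated report pairs, incrementing a defaultdict for each reporter whose reported user reached k, and finally just looks each id up.
import Mathlib
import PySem

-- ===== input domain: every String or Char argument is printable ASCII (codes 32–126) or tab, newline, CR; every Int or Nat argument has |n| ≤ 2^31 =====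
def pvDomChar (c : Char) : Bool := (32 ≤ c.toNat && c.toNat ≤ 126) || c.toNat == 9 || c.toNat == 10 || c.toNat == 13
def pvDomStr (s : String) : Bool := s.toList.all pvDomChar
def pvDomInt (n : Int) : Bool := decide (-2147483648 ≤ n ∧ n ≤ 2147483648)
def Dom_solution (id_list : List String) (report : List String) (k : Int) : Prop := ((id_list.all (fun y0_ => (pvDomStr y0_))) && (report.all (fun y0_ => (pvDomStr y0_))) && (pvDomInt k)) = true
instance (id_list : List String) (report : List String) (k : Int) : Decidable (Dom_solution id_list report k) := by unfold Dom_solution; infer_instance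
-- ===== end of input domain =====

-- B replaces A's nested per-id scan of each reporter's reported-set by one flat counting pass
-- over the deduplicated report pairs (objective: simpler decomposition).

-- ===== PORT A =====
-- the body of A's first 'for i in report:' loop ('poli, coco = i.split()' raises ValueError
-- unless the string splits into exactly two words; such inputs are outside Pre_solution,
-- the port skips the entry there)
def aStep (st : PySem.Dict String (PySem.Set String) × PySem.Dict String Int) (i : String) :
    PySem.Dict String (PySem.Set String) × PySem.Dict String Int :=
  match PySem.Str.split₀ i with
  | [poli, coco] =>
      (st.1.modify poli PySem.Set.empty (fun s => s.add coco),   -- user[poli].add(coco)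
       st.2.modify coco 0 (· + 1))                               -- cnt[coco] += 1
  | _ => st

def solution (id_list : List String) (report : List String) (k : Int) : List Int :=
  let rep : PySem.Set String := PySem.Set.ofList report          -- report = list(set(report))
  let st := rep.foldl aStep (PySem.Dict.empty, PySem.Dict.empty) -- (user, cnt)
  id_list.map (fun j =>
    (st.1.getD j PySem.Set.empty).foldl
      (fun result t => if st.2.getD t 0 ≥ k then result + 1 else result) 0)

-- ===== PORT B =====
-- tuple(r.split()) for a two-word report string (Python indexing r.split()[i])
def pairOf (r : String) : String × String :=
  (PySem.List.pyGetD (PySem.Str.split₀ r) 0 "", PySem.List.pyGetD (PySem.Str.split₀ r) 1 "")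

def solution_alt (id_list : List String) (report : List String) (k : Int) : List Int :=
  let dedup : PySem.Set String := PySem.Set.ofList report
  let cnt := dedup.foldl
    (fun (c : PySem.Dict String Int) r =>
      c.modify (PySem.List.pyGetD (PySem.Str.split₀ r) 1 "") 0 (· + 1))
    PySem.Dict.empty
  let pairs : PySem.Set (String × String) := PySem.Set.ofList (dedup.map pairOf)
  let res := pairs.foldl
    (fun (d : PySem.Dict String Int) pc =>
      if cnt.getD pc.2 0 ≥ k then d.modify pc.1 0 (· + 1) else d)
    PySem.Dict.empty
  id_list.map (fun i => res.getD i 0)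

-- ===== PRECONDITION & SPEC =====
-- Pre_ excludes exactly the inputs where A raises ValueError: a report entry that does not
-- split into exactly two whitespace-separated words.
def Pre_solution (id_list : List String) (report : List String) (k : Int) : Prop :=
  ∀ r ∈ report, (PySem.Str.split₀ r).length = 2
instance (id_list : List String) (report : List String) (k : Int) : Decidable (Pre_solution id_list report k) := by unfold Pre_solution; infer_instance
def pvWitness_solution : List String × List String × Int :=
  (["muzi", "frodo", "apeach", "neo"], ["muzi frodo", "apeach frodo", "frodo neo", "muzi neo", "apeach muzi"], 2)

def Spec_solution (id_list : List String) (report : List String) (k : Int) (out : List Int) : Prop := out = solution_alt id_list report k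
instance (id_list : List String) (report : List String) (k : Int) (out : List Int) : Decidable (Spec_solution id_list report k out) := by unfold Spec_solution; infer_instance

-- ===== CLAIM (what is proved, stated in full; the proofs are below) =====
def Claim_equal_solution : Prop := ∀ (id_list : List String) (report : List String) (k : Int), Dom_solution id_list report k → Pre_solution id_list report k → Spec_solution id_list report k (solution id_list report k)

-- ===== LEMMAS AND PROOFS =====

-- a two-word split, presented as a literal list
lemma split_two {r : String} (h : (PySem.Str.split₀ r).length = 2) :
    PySem.Str.split₀ r = [(pairOf r).1, (pairOf r).2] := by
  rcases hs : PySem.Str.split₀ r with _ | ⟨a, _ | ⟨b, _ | _⟩⟩ <;>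
    simp [hs] at h ⊢ <;> simp [pairOf, hs, PySem.List.pyGetD]

-- the cnt component of A's fold is B's cnt fold
lemma cnt_eq (L : List String) (hL : ∀ r ∈ L, (PySem.Str.split₀ r).length = 2)
    (u : PySem.Dict String (PySem.Set String)) (c : PySem.Dict String Int) :
    (L.foldl aStep (u, c)).2 =
      L.foldl (fun (c : PySem.Dict String Int) r =>
        c.modify (PySem.List.pyGetD (PySem.Str.split₀ r) 1 "") 0 (· + 1)) c := by
  induction L generalizing u c with
  | nil => rfl
  | cons i L ih =>
    have h2 := hL i (by simp)
    rw [List.foldl_cons, List.foldl_cons]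
    rw [show aStep (u, c) i =
        (u.modify (pairOf i).1 PySem.Set.empty (fun s => s.add (pairOf i).2),
         c.modify (pairOf i).2 0 (· + 1)) by unfold aStep; rw [split_two h2]]
    rw [ih (fun r hr => hL r (by simp [hr])) _ _]
    rfl

-- membership in user[j] after A's fold
lemma user_mem (L : List String) (hL : ∀ r ∈ L, (PySem.Str.split₀ r).length = 2)
    (u : PySem.Dict String (PySem.Set String)) (c : PySem.Dict String Int)
    (j x : String) :
    x ∈ ((L.foldl aStep (u, c)).1.getD j PySem.Set.empty) ↔
      x ∈ (u.getD j PySem.Set.empty) ∨ (j, x) ∈ L.map pairOf := by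
  induction L generalizing u c with
  | nil => simp
  | cons i L ih =>
    have h2 := hL i (by simp)
    rw [List.foldl_cons]
    rw [show aStep (u, c) i =
        (u.modify (pairOf i).1 PySem.Set.empty (fun s => s.add (pairOf i).2),
         c.modify (pairOf i).2 0 (· + 1)) by unfold aStep; rw [split_two h2]]
    rw [ih (fun r hr => hL r (by simp [hr])) _ _]
    by_cases hj : j = (pairOf i).1
    · subst hj
      rw [PySem.Dict.getD_modify_self]
      simp only [List.map_cons, List.mem_cons, PySem.Set.mem_add]
      constructor
      · rintro (⟨h | h⟩ | h)
        · exact Or.inl h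
        · exact Or.inr (Or.inl (by rw [h]))
        · exact Or.inr (Or.inr h)
      · rintro (h | h | h)
        · exact Or.inl (Or.inl h)
        · exact Or.inl (Or.inr (by rw [← h]))
        · exact Or.inr h
    · rw [PySem.Dict.getD_modify_of_ne _ _ _ hj]
      simp only [List.map_cons, List.mem_cons]
      constructor
      · rintro (h | h)
        · exact Or.inl h
        · exact Or.inr (Or.inr h)
      · rintro (h | h | h)
        · exact Or.inl h
        · exact absurd (congrArg Prod.fst h) (by simpa using hj)
        · exact Or.inr h

-- user[j] stays duplicate-free through A's fold
lemma user_nodup (L : List String)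
    (u : PySem.Dict String (PySem.Set String)) (c : PySem.Dict String Int)
    (hu : ∀ j, (u.getD j PySem.Set.empty).Nodup) (j : String) :
    ((L.foldl aStep (u, c)).1.getD j PySem.Set.empty).Nodup := by
  induction L generalizing u c with
  | nil => exact hu j
  | cons i L ih =>
    rw [List.foldl_cons]
    unfold aStep
    rcases hs : PySem.Str.split₀ i with _ | ⟨a, _ | ⟨b, _ | _⟩⟩
    · exact ih u c hu
    · exact ih u c hu
    · refine ih _ _ (fun j' => ?_)
      by_cases hj' : j' = a
      · subst hj'
        rw [PySem.Dict.getD_modify_self]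
        exact PySem.Set.nodup_add _ _ (hu j')
      · rw [PySem.Dict.getD_modify_of_ne _ _ _ hj']
        exact hu j'
    · exact ih u c hu

-- the value B's accumulation dict assigns to j, as a countP over the pair list
lemma res_getD (P : List (String × String)) (cnt : PySem.Dict String Int) (k : Int)
    (d : PySem.Dict String Int) (j : String) :
    (P.foldl (fun (d : PySem.Dict String Int) pc =>
        if cnt.getD pc.2 0 ≥ k then d.modify pc.1 0 (· + 1) else d) d).getD j 0 =
      d.getD j 0 + (P.countP (fun pc => pc.1 == j && decide (cnt.getD pc.2 0 ≥ k)) : Int) := by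
  induction P generalizing d with
  | nil => simp
  | cons pc P ih =>
    rw [List.foldl_cons, List.countP_cons, ih]
    by_cases hb : cnt.getD pc.2 0 ≥ k
    · by_cases hj : pc.1 = j
      · rw [if_pos hb]
        rw [show (d.modify pc.1 0 (· + 1)).getD j 0 = d.getD j 0 + 1 by
          rw [← hj]; exact PySem.Dict.getD_modify_self d pc.1 0 (· + 1)]
        simp [hj, hb]; ring
      · rw [if_pos hb, PySem.Dict.getD_modify_of_ne _ _ _ (Ne.symm hj)]
        simp [hj, hb]
    · rw [if_neg hb]
      simp [hb]

-- counting a predicate over two duplicate-free lists with the same members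
lemma countP_eq_of_mem_iff {α : Type} [DecidableEq α] (l₁ l₂ : List α)
    (h₁ : l₁.Nodup) (h₂ : l₂.Nodup) (h : ∀ x, x ∈ l₁ ↔ x ∈ l₂) (p : α → Bool) :
    l₁.countP p = l₂.countP p :=
  List.Perm.countP_congr ((List.perm_ext_iff_of_nodup h₁ h₂).mpr h) (fun _ _ => rfl)

-- the rows of the deduplicated pair set with first component j, projected to snd, are nodup
lemma pairs_filter_nodup (P : List (String × String)) (hP : P.Nodup) (j : String) :
    ((P.filter (fun pc => pc.1 == j)).map (·.2)).Nodup := by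
  refine (hP.filter _).map_on ?_
  intro x hx y hy hxy
  have hxj := (List.of_mem_filter hx)
  have hyj := (List.of_mem_filter hy)
  simp only [beq_iff_eq] at hxj hyj
  exact Prod.ext (hxj.trans hyj.symm) hxy

-- ===== VERDICT (by name: the statement is the Claim_ definition above) =====
theorem solution_spec : Claim_equal_solution := by
  intro id_list report k _hDom hPre
  unfold Spec_solution solution solution_alt
  simp only []
  apply List.map_congr_left
  intro j _hj
  set rep : PySem.Set String := PySem.Set.ofList report with hrep
  have hrepPre : ∀ r ∈ rep, (PySem.Str.split₀ r).length = 2 := by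
    intro r hr
    exact hPre r ((PySem.Set.mem_ofList report r).mp hr)
  rw [cnt_eq rep hrepPre PySem.Dict.empty PySem.Dict.empty]
  set cnt : PySem.Dict String Int := rep.foldl (fun (c : PySem.Dict String Int) r =>
      c.modify (PySem.List.pyGetD (PySem.Str.split₀ r) 1 "") 0 (· + 1)) PySem.Dict.empty with hcnt
  set U : PySem.Set String :=
    (rep.foldl aStep (PySem.Dict.empty, PySem.Dict.empty)).1.getD j PySem.Set.empty with hU
  have hA := PySem.List.foldl_count_if (fun t => decide (cnt.getD t 0 ≥ k)) U 0
  simp only [decide_eq_true_eq, zero_add] at hA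
  rw [hA]
  set P : PySem.Set (String × String) := PySem.Set.ofList (rep.map pairOf) with hP
  have hPnodup : P.Nodup := PySem.Set.nodup_ofList _
  have hmm : ∀ x, x ∈ U ↔ x ∈ (P.filter (fun pc => pc.1 == j)).map (·.2) := by
    intro x
    rw [hU, user_mem rep hrepPre PySem.Dict.empty PySem.Dict.empty j x]
    simp only [PySem.Dict.getD_empty, List.mem_map, List.mem_filter]
    constructor
    · rintro (h | h)
      · simp at h
      · exact ⟨(j, x), ⟨(PySem.Set.mem_ofList _ _).mpr (List.mem_map.mpr h), by simp⟩, rfl⟩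
    · rintro ⟨pc, ⟨hpc, hj1⟩, hj2⟩
      right
      have hpcx : pc = (j, x) := Prod.ext (by simpa using hj1) hj2
      rw [← hpcx]
      exact List.mem_map.mp ((PySem.Set.mem_ofList _ _).mp hpc)
  have hcount := countP_eq_of_mem_iff U ((P.filter (fun pc => pc.1 == j)).map (·.2))
      (hU ▸ user_nodup rep PySem.Dict.empty PySem.Dict.empty (by simp) j)
      (pairs_filter_nodup P hPnodup j) hmm (fun t => decide (cnt.getD t 0 ≥ k))
  rw [hcount]
  rw [res_getD]
  rw [PySem.Dict.getD_empty, List.countP_map, List.countP_filter]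
  simp only [zero_add, Function.comp]
  congr 2
  funext pc
  by_cases h1 : pc.1 = j <;> by_cases h2 : cnt.getD pc.2 0 ≥ k <;> simp [h1, h2]
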